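-- pv_equiv track=rewrite | github.com/BTheDragonMaster/parasect | src/parasect/core/featurisation.py | group_n_terminal_hits
-- ===== SOURCE A (Python) =====
-- def merge_hits(hits: list[tuple[str, int, int, str]]) -> tuple[str, int, int, str]:
--     """
--     Merge N-terminal AMP-binding hits
--
--     :param hits: list of AMP-binding HMM hits
--     :type hits: list[tuple[str, int, int, str]]
--     """
--
--     if hits:
--         seq_id, hit_id, _ = hits[0][3].split('|')
--         for hit in hits:
--             seq_id_2, hit_id_2, _ = hit[3].split('|')
--             if seq_id_2 != seq_id:
--                 raise ValueError(f"Cannot merge hits from different sequences! {seq_id}, {seq_id_2}")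
--             if hit_id_2 != hit_id:
--                 raise ValueError(f"Cannot merge different hit types! {hit_id}, {hit_id_2}")
--
--         hit_start = min([hit[1] for hit in hits])
--         hit_end = max([hit[2] for hit in hits])
--         hit_key = f"{seq_id}|{hit_id}|{hit_start}-{hit_end}"
--         merged_hit = (hit_id, hit_start, hit_end, hit_key)
--         return merged_hit
--     else:
--         raise ValueError("No hits to merge!")
--
-- def group_n_terminal_hits(hit_list: list[tuple[str, int, int, str]]) -> list[tuple[str, int, int, str]]:
--     """
--     Group and merge N-terminal AMP-binding hits within a single protein
--
--     :param hit_list: list of AMP-binding HMM hits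
--     :type hit_list: list[tuple[str, int, int, str]]
--     """
--     n_terminal_hits = []
--     c_terminal_hits = []
--     seq_ids = set()
--
--     for hit in hit_list:
--
--         hit_id, hit_start, hit_end, hit_key = hit
--         seq_id = hit_key.split('|')[0]
--         seq_ids.add(seq_id)
--         if hit_id == "AMP-binding":
--             n_terminal_hits.append(hit)
--         elif hit_id == "AMP-binding_C":
--             c_terminal_hits.append(hit)
--
--     if len(seq_ids) > 1:
--         raise ValueError("Cannot group hits from multiple sequences!")
--
--     n_terminal_hits.sort(key=lambda x: x[1])
--     c_terminal_hits.sort(key=lambda x: x[1])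
--
--     grouped_hits = []
--     if n_terminal_hits:
--         group = [n_terminal_hits[0]]
--
--         for i, hit_1 in enumerate(n_terminal_hits):
--             if i + 1 < len(n_terminal_hits):
--                 hit_2 = n_terminal_hits[i + 1]
--                 if hit_2[1] - hit_1[2] < 60:
--                     group.append(hit_2)
--                 else:
--                     grouped_hits.append(group[:])
--                     group = [hit_2]
--             else:
--                 grouped_hits.append(group[:])
--                 group = []
--
--     merged_n_terminal = []
--
--     for group in grouped_hits:
--         merged_hit = merge_hits(group)
--         merged_n_terminal.append(merged_hit)
--
--     return merged_n_terminal + c_terminal_hits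
-- ===== SOURCE B (Python) =====
-- def _take_group(rest):
--     # rest is nonempty; peel off the maximal chain of hits whose gap to the
--     # previous hit's end is < 60
--     group = [rest[0]]
--     i = 1
--     while i < len(rest) and rest[i][1] - group[-1][2] < 60:
--         group.append(rest[i])
--         i += 1
--     return group, rest[i:]
--
--
-- def _merge_group(group):
--     # group is nonempty and sorted by start, so group[0][1] is the minimal start
--     seq_id, hit_id, _ = group[0][3].split('|')
--     start = group[0][1]
--     end = max(h[2] for h in group)
--     return (hit_id, start, end, f"{seq_id}|{hit_id}|{start}-{end}")
--
--
-- def group_n_terminal_hits(hit_list: list[tuple[str, int, int, str]]) -> list[tuple[str, int, int, str]]: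
--     if len({h[3].split('|')[0] for h in hit_list}) > 1:
--         raise ValueError("Cannot group hits from multiple sequences!")
--     n_hits = sorted([h for h in hit_list if h[0] == "AMP-binding"], key=lambda h: h[1])
--     c_hits = sorted([h for h in hit_list if h[0] == "AMP-binding_C"], key=lambda h: h[1])
--     merged = []
--     rest = n_hits
--     while rest:
--         group, rest = _take_group(rest)
--         merged.append(_merge_group(group))
--     return merged + c_hits
-- ===== Notes on version B (the rewrite author's own statement) =====
-- stated objective: simpler
-- what changed: Replaces the enumerate/lookahead-index grouping loop plus a separate validating merge pass with a direct greedy peel: repeatedly slice off the maximal <60-gap chain from the sorted list and merge it inline, taking the chain's first start (minimal by sortedness) instead of recomputing min; Pre_ is exactly the inputs where A returns (it excludes only A's ValueError cases: multiple sequence ids, malformed AMP-binding keys, or mixed hit types inside one merge group).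
import Mathlib
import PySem

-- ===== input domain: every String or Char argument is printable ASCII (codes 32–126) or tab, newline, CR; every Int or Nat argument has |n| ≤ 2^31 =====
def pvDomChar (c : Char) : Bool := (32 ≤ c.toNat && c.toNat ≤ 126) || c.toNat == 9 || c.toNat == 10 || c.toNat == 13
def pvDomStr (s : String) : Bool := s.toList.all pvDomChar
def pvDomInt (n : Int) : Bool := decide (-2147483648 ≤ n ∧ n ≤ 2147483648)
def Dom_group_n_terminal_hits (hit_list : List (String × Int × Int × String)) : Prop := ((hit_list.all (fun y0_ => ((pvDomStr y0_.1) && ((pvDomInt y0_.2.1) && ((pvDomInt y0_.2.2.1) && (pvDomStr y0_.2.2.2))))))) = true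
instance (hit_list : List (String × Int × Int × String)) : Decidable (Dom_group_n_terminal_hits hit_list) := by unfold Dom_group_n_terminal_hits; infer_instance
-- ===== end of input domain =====

-- B replaces A's enumerate/lookahead grouping loop + validating merge_hits pass by a greedy
-- peel (slice off each maximal <60-gap chain of the sorted hits and merge it inline, taking the
-- chain's first start instead of recomputing min): simpler decomposition, same cost.


abbrev Hit := String × Int × Int × String

-- shared helpers (both Pythons contain these expressions verbatim)
-- s.split('|') (sep non-empty, so split? always returns some)
def pvSplit (s : String) : List String := (PySem.Str.split? s "|").getD []

-- hit[3].split('|')[0]  (split('|') is never empty, so [0] is the head)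
def pvField0 (h : Hit) : String := (pvSplit h.2.2.2).headD ""

-- hit[3].split('|')[1] (the hit-type field), as an Option
def pvMid (h : Hit) : Option String := (pvSplit h.2.2.2)[1]?

-- f"{seq_id}|{hit_id}|{start}-{end}"
def pvMkKey (seq_id hit_id : String) (a b : Int) : String :=
  PySem.Str.join "" [seq_id, "|", hit_id, "|", PySem.Int.toStr a, "-", PySem.Int.toStr b]

-- ===== PORT A =====

-- merge_hits; branches where Python raises ValueError return a junk tuple (outside Pre_)
def pvMergeHits (hits : List Hit) : Hit :=
  match hits with
  | [] => ("", 0, 0, "")                -- raise ValueError("No hits to merge!")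
  | h0 :: _ =>
    match pvSplit h0.2.2.2 with
    | [seq_id, hit_id, _] =>
      if hits.all (fun h =>
            match pvSplit h.2.2.2 with
            | [s2, h2, _] => s2 == seq_id && h2 == hit_id
            | _ => false) then          -- the per-hit loop: any mismatch / bad key raises
        let hit_start := (PySem.List.min? (hits.map (fun h => h.2.1)) (fun x => x)).getD 0
        let hit_end := (PySem.List.max? (hits.map (fun h => h.2.2.1)) (fun x => x)).getD 0
        (hit_id, hit_start, hit_end, pvMkKey seq_id hit_id hit_start hit_end)
      else ("", 0, 0, "")               -- raise ValueError (mismatching seq/hit id)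
    | _ => ("", 0, 0, "")               -- unpack of split('|') raises ValueError

-- body of 'for hit in hit_list' (partition + seq_ids set)
def pvStepPart (st : List Hit × List Hit × PySem.Set String) (hit : Hit) :
    List Hit × List Hit × PySem.Set String :=
  let seq_ids := PySem.Set.add st.2.2 (pvField0 hit)
  if hit.1 == "AMP-binding" then (st.1 ++ [hit], st.2.1, seq_ids)
  else if hit.1 == "AMP-binding_C" then (st.1, st.2.1 ++ [hit], seq_ids)
  else (st.1, st.2.1, seq_ids)

-- body of 'for i, hit_1 in enumerate(n_terminal_hits)'
def pvStepLoop (n : List Hit) (st : List Hit × List (List Hit)) (p : Int × Hit) :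
    List Hit × List (List Hit) :=
  if p.1 + 1 < PySem.List.len n then
    match PySem.List.pyGet? n (p.1 + 1) with
    | some hit2 =>
      if hit2.2.1 - p.2.2.2.1 < 60 then (st.1 ++ [hit2], st.2)
      else ([hit2], st.2 ++ [st.1])
    | none => (st.1, st.2)              -- unreachable: i + 1 < len(n)
  else ([], st.2 ++ [st.1])

def group_n_terminal_hits (hit_list : List (String × Int × Int × String)) :
    List (String × Int × Int × String) :=
  let acc := hit_list.foldl pvStepPart ([], [], PySem.Set.empty)
  if 1 < PySem.Set.len acc.2.2 then []  -- raise ValueError (multiple sequences); outside Pre_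
  else
    let n_terminal := PySem.List.sorted acc.1 (fun x => x.2.1) false
    let c_terminal := PySem.List.sorted acc.2.1 (fun x => x.2.1) false
    let grouped :=
      match n_terminal with
      | [] => ([] : List (List Hit))
      | h0 :: _ =>
        (List.foldl (pvStepLoop n_terminal) ([h0], []) (PySem.List.enumerate n_terminal)).2
    grouped.map pvMergeHits ++ c_terminal

-- ===== PORT B =====

-- _take_group: peel the maximal chain whose gap to the previous hit is < 60
def pvTakeGroup (prev : Hit) : List Hit → List Hit × List Hit
  | [] => ([], [])
  | h :: t =>
    if h.2.1 - prev.2.2.1 < 60 then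
      ((pvTakeGroup h t).1.cons h, (pvTakeGroup h t).2)
    else ([], h :: t)

-- needed by pvGroups's termination proof
theorem pvTakeGroup_snd_suffix (prev : Hit) (t : List Hit) : (pvTakeGroup prev t).2 <:+ t := by
  induction t generalizing prev with
  | nil => simp [pvTakeGroup]
  | cons h t ih =>
    simp only [pvTakeGroup]
    split
    · exact (ih h).trans (List.suffix_cons h t)
    · exact List.suffix_rfl

-- the outer 'while rest:' loop
def pvGroups : List Hit → List (List Hit)
  | [] => []
  | h :: t => (h :: (pvTakeGroup h t).1) :: pvGroups (pvTakeGroup h t).2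
termination_by l => l.length
decreasing_by
  have := (pvTakeGroup_snd_suffix h t).length_le
  simp only [List.length_cons]; omega

-- _merge_group (group nonempty and sorted by start; bad head key = Python ValueError, outside Pre_)
def pvMergeGroup (group : List Hit) : Hit :=
  match group with
  | [] => ("", 0, 0, "")                -- unreachable: pvGroups only yields nonempty groups
  | h0 :: _ =>
    match pvSplit h0.2.2.2 with
    | [seq_id, hit_id, _] =>
      let s := h0.2.1
      let e := (PySem.List.max? (group.map (fun h => h.2.2.1)) (fun x => x)).getD 0
      (hit_id, s, e, pvMkKey seq_id hit_id s e)
    | _ => ("", 0, 0, "")               -- unpack of split('|') raises ValueError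

def group_n_terminal_hits_alt (hit_list : List (String × Int × Int × String)) :
    List (String × Int × Int × String) :=
  if 1 < PySem.Set.len (PySem.Set.ofList (hit_list.map pvField0)) then []  -- raise ValueError
  else
    let n := PySem.List.sorted (hit_list.filter (fun h => h.1 == "AMP-binding")) (fun x => x.2.1) false
    let c := PySem.List.sorted (hit_list.filter (fun h => h.1 == "AMP-binding_C")) (fun x => x.2.1) false
    (pvGroups n).map pvMergeGroup ++ c

-- ===== PRECONDITION & SPEC =====
-- Pre_ excludes exactly the inputs on which A raises ValueError: hits from several distinct
-- sequence ids, an AMP-binding hit whose key does not split into exactly 3 '|'-fields, or two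
-- adjacent hits of the <60-gap-sorted AMP-binding chain with different hit-type fields (a
-- mixed-type merge group); A returns normally on every other input, and Pre_ admits all of them.
def Pre_group_n_terminal_hits (hit_list : List (String × Int × Int × String)) : Prop :=
  (∀ x ∈ hit_list, ∀ y ∈ hit_list, pvField0 x = pvField0 y) ∧
  (∀ x ∈ hit_list, x.1 = "AMP-binding" → (pvSplit x.2.2.2).length = 3) ∧
  List.IsChain (fun a b => b.2.1 - a.2.2.1 < 60 → pvMid a = pvMid b)
    (PySem.List.sorted (hit_list.filter (fun h => h.1 == "AMP-binding")) (fun x => x.2.1) false)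

instance (hit_list : List (String × Int × Int × String)) :
    Decidable (Pre_group_n_terminal_hits hit_list) := by
  unfold Pre_group_n_terminal_hits; infer_instance

def pvWitness_group_n_terminal_hits : (List (String × Int × Int × String)) :=
  [("AMP-binding", 0, 10, "seqA|AMP-binding|0-10"),
   ("AMP-binding", 70, 90, "seqA|AMP-binding|70-90"),
   ("AMP-binding_C", 95, 110, "seqA|AMP-binding_C|95-110")]

def Spec_group_n_terminal_hits (hit_list : List (String × Int × Int × String))
    (out : List (String × Int × Int × String)) : Prop :=
  out = group_n_terminal_hits_alt hit_list

instance (hit_list : List (String × Int × Int × String))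
    (out : List (String × Int × Int × String)) :
    Decidable (Spec_group_n_terminal_hits hit_list out) := by
  unfold Spec_group_n_terminal_hits; infer_instance

-- ===== CLAIM (what is proved, stated in full; the proofs are below) =====
def Claim_equal_group_n_terminal_hits : Prop :=
  ∀ (hit_list : List (String × Int × Int × String)), Dom_group_n_terminal_hits hit_list →
    Pre_group_n_terminal_hits hit_list →
    Spec_group_n_terminal_hits hit_list (group_n_terminal_hits hit_list)

-- ===== LEMMAS AND PROOFS =====
theorem pv_partition_eq (l : List Hit) (n c : List Hit) (s : PySem.Set String) :
    l.foldl pvStepPart (n, c, s) =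
      (n ++ l.filter (fun h => h.1 == "AMP-binding"),
       c ++ l.filter (fun h => h.1 == "AMP-binding_C"),
       (l.map pvField0).foldl PySem.Set.add s) := by
  induction l generalizing n c s with
  | nil => simp
  | cons h t ih =>
    simp only [List.foldl_cons, List.map_cons, List.filter_cons, pvStepPart]
    by_cases h1 : h.1 = "AMP-binding"
    · simp [h1, ih]
    · by_cases h2 : h.1 = "AMP-binding_C" <;> simp [h1, h2, ih]

theorem pv_nodup_small {α : Type} {l : List α} {a : α} (hn : l.Nodup)
    (h : ∀ x ∈ l, x = a) : l.length ≤ 1 := by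
  match l with
  | [] => simp
  | [x] => simp
  | x :: y :: t =>
    exfalso
    have hx := h x (by simp)
    have hy := h y (by simp)
    simp [List.nodup_cons] at hn
    exact hn.1.1 (hx.trans hy.symm)

theorem pv_set_small {l : List Hit}
    (h : ∀ x ∈ l, ∀ y ∈ l, pvField0 x = pvField0 y) :
    (PySem.Set.ofList (l.map pvField0)).length ≤ 1 := by
  match l with
  | [] => simp [PySem.Set.ofList_nil]
  | h0 :: t =>
    apply pv_nodup_small (a := pvField0 h0) (PySem.Set.nodup_ofList _)
    intro x hx
    rw [PySem.Set.mem_ofList] at hx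
    simp only [List.mem_map] at hx
    obtain ⟨y, hy, rfl⟩ := hx
    exact h y hy h0 (by simp)

theorem pv_foldl_min_eq (l : List Int) (x : Int) (h : ∀ y ∈ l, x ≤ y) :
    l.foldl min x = x := by
  induction l with
  | nil => rfl
  | cons a t ih =>
    simp only [List.foldl_cons]
    rw [min_eq_left (h a (by simp))]
    exact ih (fun y hy => h y (List.mem_cons_of_mem _ hy))

theorem pv_len3 {s : List String} (h : s.length = 3) : ∃ a b c, s = [a, b, c] := by
  match s, h with
  | [a, b, c], _ => exact ⟨a, b, c, rfl⟩

theorem pv_loop_eq (n : List Hit) (t : List Hit) (k : Nat) (G : List Hit)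
    (gr : List (List Hit)) (h : Hit) (hd : n.drop k = h :: t) :
    (List.foldl (pvStepLoop n) (G ++ [h], gr) (PySem.List.enumerate (h :: t) (k : Int))).2
      = gr ++ ((G ++ h :: (pvTakeGroup h t).1) :: pvGroups (pvTakeGroup h t).2) := by
  induction t generalizing k G gr h with
  | nil =>
    have hlen : n.length = k + 1 := by
      have h1 := congrArg List.length hd
      rw [List.length_drop] at h1
      have : k ≤ n.length := by
        by_contra hc
        rw [List.drop_eq_nil_of_le (by omega)] at hd
        simp at hd
      simp at h1; omega
    rw [PySem.List.enumerate_cons, PySem.List.enumerate_nil]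
    simp only [List.foldl_cons, List.foldl_nil, pvStepLoop, PySem.List.len_eq, hlen]
    rw [if_neg (by push_cast; omega)]
    simp [pvTakeGroup, pvGroups]
  | cons a t' ih =>
    have hk1 : n.drop (k + 1) = a :: t' := by
      rw [← List.drop_drop, hd]; rfl
    have hlen : k + 1 < n.length := by
      have h1 := congrArg List.length hk1
      rw [List.length_drop] at h1
      simp at h1; omega
    have hget : PySem.List.pyGet? n ((k : Int) + 1) = some a := by
      have : ((k : Int) + 1) = ((k + 1 : Nat) : Int) := by push_cast; ring
      rw [this, PySem.List.pyGet?_natCast]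
      have := congrArg (fun l => l[0]?) hk1
      simpa [List.getElem?_drop] using this
    rw [PySem.List.enumerate_cons]
    simp only [List.foldl_cons]
    have hstep : pvStepLoop n (G ++ [h], gr) ((k : Int), h) =
        if a.2.1 - h.2.2.1 < 60 then ((G ++ [h]) ++ [a], gr) else ([a], gr ++ [G ++ [h]]) := by
      simp only [pvStepLoop, PySem.List.len_eq]
      rw [if_pos (by omega), hget]
    rw [hstep]
    by_cases hgap : a.2.1 - h.2.2.1 < 60
    · rw [if_pos hgap]
      have hrec := ih (k + 1) (G ++ [h]) gr a hk1
      push_cast at hrec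
      rw [hrec]
      simp only [pvTakeGroup, if_pos hgap]
      simp
    · rw [if_neg hgap]
      have hrec := ih (k + 1) [] (gr ++ [G ++ [h]]) a hk1
      push_cast at hrec
      simp only [List.nil_append] at hrec
      rw [hrec]
      simp only [pvTakeGroup, if_neg hgap]
      rw [pvGroups]
      simp

theorem pv_mem_takeGroup_fst {x : Hit} {p : Hit} {t : List Hit}
    (hx : x ∈ (pvTakeGroup p t).1) : x ∈ t := by
  induction t generalizing p with
  | nil => simp [pvTakeGroup] at hx
  | cons h t ih =>
    simp only [pvTakeGroup] at hx
    split at hx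
    · rcases List.mem_cons.mp hx with rfl | hx
      · simp
      · exact List.mem_cons_of_mem _ (ih hx)
    · simp at hx

theorem pv_mem_pvGroups {g : List Hit} {n : List Hit} (hg : g ∈ pvGroups n) :
    ∀ x ∈ g, x ∈ n := by
  induction n using pvGroups.induct with
  | case1 => simp [pvGroups] at hg
  | case2 h t ih =>
    simp only [pvGroups, List.mem_cons] at hg
    rcases hg with rfl | hg
    · intro x hx
      rcases List.mem_cons.mp hx with rfl | hx
      · simp
      · exact List.mem_cons_of_mem _ (pv_mem_takeGroup_fst hx)
    · intro x hx
      have := ih hg x hx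
      exact List.mem_cons_of_mem _ ((pvTakeGroup_snd_suffix h t).subset this)

theorem pv_pvGroups_head_min {n : List Hit}
    (hp : n.Pairwise (fun a b => a.2.1 ≤ b.2.1)) :
    ∀ g ∈ pvGroups n, ∃ h0 r, g = h0 :: r ∧ ∀ y ∈ r, h0.2.1 ≤ y.2.1 := by
  induction n using pvGroups.induct with
  | case1 => simp [pvGroups]
  | case2 h t ih =>
    intro g hg
    rw [List.pairwise_cons] at hp
    simp only [pvGroups, List.mem_cons] at hg
    rcases hg with rfl | hg
    · exact ⟨h, _, rfl, fun y hy => hp.1 y (pv_mem_takeGroup_fst hy)⟩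
    · exact ih (hp.2.sublist (pvTakeGroup_snd_suffix h t).sublist) g hg

-- all elements of a peeled chain share the head's hit-type field (from the adjacency condition)
theorem pv_takeGroup_mid {t : List Hit} {prev : Hit}
    (hc : List.IsChain (fun a b => b.2.1 - a.2.2.1 < 60 → pvMid a = pvMid b) (prev :: t)) :
    ∀ x ∈ (pvTakeGroup prev t).1, pvMid x = pvMid prev := by
  induction t generalizing prev with
  | nil => simp [pvTakeGroup]
  | cons h t ih =>
    intro x hx
    simp only [pvTakeGroup] at hx
    split at hx
    · rename_i hgap
      have hph : pvMid prev = pvMid h := hc.rel_head hgap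
      rcases List.mem_cons.mp hx with rfl | hx
      · exact hph.symm
      · exact (ih hc.tail x hx).trans hph.symm
    · simp at hx

-- elements of one merge group all share the same hit-type field
theorem pv_groups_mid {n : List Hit}
    (hc : List.IsChain (fun a b => b.2.1 - a.2.2.1 < 60 → pvMid a = pvMid b) n) :
    ∀ g ∈ pvGroups n, ∀ x ∈ g, ∀ y ∈ g, pvMid x = pvMid y := by
  induction n using pvGroups.induct with
  | case1 => simp [pvGroups]
  | case2 h t ih =>
    intro g hg x hx y hy
    simp only [pvGroups, List.mem_cons] at hg
    rcases hg with rfl | hg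
    · have hall : ∀ z ∈ (h :: (pvTakeGroup h t).1), pvMid z = pvMid h := by
        intro z hz
        rcases List.mem_cons.mp hz with rfl | hz
        · rfl
        · exact pv_takeGroup_mid hc z hz
      exact (hall x hx).trans (hall y hy).symm
    · exact ih (hc.suffix ((pvTakeGroup_snd_suffix h t).trans (List.suffix_cons h t))) g hg x hx y hy

theorem pv_merge_eq (h0 : Hit) (r : List Hit)
    (hmin : ∀ y ∈ r, h0.2.1 ≤ y.2.1)
    (hlen : ∀ x ∈ (h0 :: r), (pvSplit x.2.2.2).length = 3)
    (hf0 : ∀ x ∈ (h0 :: r), pvField0 x = pvField0 h0)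
    (hmid : ∀ x ∈ (h0 :: r), pvMid x = pvMid h0) :
    pvMergeHits (h0 :: r) = pvMergeGroup (h0 :: r) := by
  obtain ⟨s, m, w, hs⟩ := pv_len3 (hlen h0 (by simp))
  have hall : (h0 :: r).all (fun h =>
      match pvSplit h.2.2.2 with
      | [s2, h2, _] => s2 == s && h2 == m
      | _ => false) = true := by
    rw [List.all_eq_true]
    intro x hx
    obtain ⟨s2, m2, w2, hx2⟩ := pv_len3 (hlen x hx)
    have h1 : s2 = s := by
      have := hf0 x hx
      simp [pvField0, hx2, hs] at this
      exact this
    have h2 : m2 = m := by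
      have := hmid x hx
      simp [pvMid, hx2, hs] at this
      exact this
    simp [hx2, h1, h2]
  have hmin' : (PySem.List.min? ((h0 :: r).map (fun h => h.2.1)) (fun x => x)).getD 0
      = h0.2.1 := by
    rw [List.map_cons, PySem.List.min?_id_cons]
    simp only [Option.getD_some]
    apply pv_foldl_min_eq
    intro y hy
    simp only [List.mem_map] at hy
    obtain ⟨z, hz, rfl⟩ := hy
    exact hmin z hz
  simp only [pvMergeHits, pvMergeGroup, hs, hall, if_true, hmin']

-- ===== VERDICT (by name: the statement is the Claim_ definition above) =====
theorem group_n_terminal_hits_spec : Claim_equal_group_n_terminal_hits := by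
  intro l hdom hpre
  obtain ⟨hp1, hp2, hp3⟩ := hpre
  unfold Spec_group_n_terminal_hits group_n_terminal_hits group_n_terminal_hits_alt
  rw [pv_partition_eq]
  have hofl : (l.map pvField0).foldl PySem.Set.add PySem.Set.empty
      = PySem.Set.ofList (l.map pvField0) := rfl
  simp only [List.nil_append, hofl]
  have hsmall := pv_set_small hp1
  rw [if_neg (by simp only [PySem.Set.len]; omega),
      if_neg (by simp only [PySem.Set.len]; omega)]
  congr 1
  set n := PySem.List.sorted (l.filter (fun h => h.1 == "AMP-binding")) (fun x => x.2.1) false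
    with hn
  have hmerge : ∀ g ∈ pvGroups n, pvMergeHits g = pvMergeGroup g := by
    intro g hg
    have hmemn : ∀ x ∈ g, x ∈ l ∧ x.1 = "AMP-binding" := by
      intro x hx
      have := pv_mem_pvGroups hg x hx
      rw [hn, PySem.List.mem_sorted, List.mem_filter] at this
      exact ⟨this.1, by simpa using this.2⟩
    obtain ⟨h0, r, rfl, hminp⟩ :=
      pv_pvGroups_head_min (PySem.List.sorted_pairwise _ _) g hg
    have hh0 := hmemn h0 (by simp)
    apply pv_merge_eq h0 r hminp
    · intro x hx
      exact hp2 x (hmemn x hx).1 (hmemn x hx).2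
    · intro x hx
      exact hp1 x (hmemn x hx).1 h0 hh0.1
    · intro x hx
      exact pv_groups_mid hp3 _ hg x hx h0 (by simp)
  match hcase : n with
  | [] => simp [pvGroups]
  | h0 :: t =>
    have hloop := pv_loop_eq (h0 :: t) t 0 [] [] h0 (by simp)
    simp only [List.nil_append, Nat.cast_zero] at hloop
    simp only [hloop]
    rw [show pvGroups (h0 :: t)
          = (h0 :: (pvTakeGroup h0 t).1) :: pvGroups (pvTakeGroup h0 t).2 from by
        rw [pvGroups]]
    apply List.map_congr_left
    intro g hg
    exact hmerge g (by rw [pvGroups]; exact hg)
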